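-- pv_equiv track=rewrite | github.com/jigold/hail | hail/python/hailtop/utils/os.py | prefix_wout_wildcard
-- ===== SOURCE A (Python) =====
-- wildcards = ('*', '?', '[', ']', '{', '}')
--
-- def prefix_wout_wildcard(c):
--     new_c = []
--     i = 0
--     n = len(c)
--     while i < n:
--         if i < n - 1 and c[i] == '\\' and c[i + 1] in wildcards:
--             new_c.append(c[i + 1])
--             i += 2
--             continue
--         elif c[i] in wildcards:
--             return ''.join(new_c)
--         new_c.append(c[i])
--         i += 1
--     return ''.join(new_c)
-- ===== SOURCE B (Python) =====
-- wildcards = ('*', '?', '[', ']', '{', '}')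
--
-- def prefix_wout_wildcard(c):
--     # Pass 1: the cut point is the first wildcard not immediately preceded by a backslash.
--     cut = len(c)
--     prev = ''
--     for j, ch in enumerate(c):
--         if ch in wildcards and prev != '\\':
--             cut = j
--             break
--         prev = ch
--     s = c[:cut]
--     # Pass 2: unescape by dropping each backslash that immediately precedes a wildcard.
--     return ''.join(ch for i, ch in enumerate(s)
--                    if not (ch == '\\' and i + 1 < len(s) and s[i + 1] in wildcards))
-- ===== Notes on version B (the rewrite author's own statement) =====
-- stated objective: alternative
-- what changed: Replaces A's stateful consume-one-or-two-characters while loop that builds the output as it scans with two declarative passes: first find the cut point (the first wildcard not immediately preceded by a backslash), then slice the prefix and drop each backslash that immediately precedes a wildcard; the passes use enumerate/slicing/join instead of per-index access, a constant-factor speedup.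
import Mathlib
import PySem

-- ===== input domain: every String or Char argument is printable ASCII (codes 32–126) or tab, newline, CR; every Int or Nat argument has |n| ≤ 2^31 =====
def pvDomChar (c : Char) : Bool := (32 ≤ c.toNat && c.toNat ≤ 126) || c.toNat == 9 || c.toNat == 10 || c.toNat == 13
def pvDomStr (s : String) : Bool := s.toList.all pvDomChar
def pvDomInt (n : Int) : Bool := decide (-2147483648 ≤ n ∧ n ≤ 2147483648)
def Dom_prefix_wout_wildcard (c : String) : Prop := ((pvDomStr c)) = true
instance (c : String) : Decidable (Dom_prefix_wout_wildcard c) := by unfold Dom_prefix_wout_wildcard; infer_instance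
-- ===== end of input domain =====

-- B replaces A's stateful consume-one-or-two-characters loop by two declarative passes
-- (find the first unescaped wildcard, then drop escaping backslashes); objective: alternative.

def pyWildcards : List Char := ['*', '?', '[', ']', '{', '}']

-- ===== PORT A =====
-- while loop over index i ported as recursion over the remaining suffix, with the new_c accumulator
def pwwLoopA (newC : List Char) : List Char → List Char
  | [] => newC
  | a :: b :: rest2 =>
      if a = '\\' ∧ b ∈ pyWildcards then pwwLoopA (newC ++ [b]) rest2
      else if a ∈ pyWildcards then newC
      else pwwLoopA (newC ++ [a]) (b :: rest2)
  | [a] =>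
      if a ∈ pyWildcards then newC
      else newC ++ [a]

def prefix_wout_wildcard (c : String) : String := String.mk (pwwLoopA [] c.toList)

-- ===== PORT B =====
-- pass 1 of Source B: index of the first wildcard not immediately preceded by a backslash (len if none)
def pwwCut (prev : Option Char) (j : Nat) : List Char → Nat
  | [] => j
  | ch :: rest => if ch ∈ pyWildcards ∧ prev ≠ some '\\' then j else pwwCut (some ch) (j + 1) rest

-- 's[i+1] exists and is a wildcard' for the comprehension's lookahead
def pwwWildNext : List Char → Bool
  | [] => false
  | b :: _ => decide (b ∈ pyWildcards)

-- pass 2 of Source B: keep ch unless it is a backslash immediately followed by a wildcard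
def pwwDrop : List Char → List Char
  | [] => []
  | a :: rest => if a = '\\' ∧ pwwWildNext rest = true then pwwDrop rest else a :: pwwDrop rest

def prefix_wout_wildcard_alt (c : String) : String :=
  String.mk (pwwDrop ((c.toList).take (pwwCut none 0 c.toList)))

-- ===== PRECONDITION & SPEC =====
def Spec_prefix_wout_wildcard (c : String) (out : String) : Prop := out = prefix_wout_wildcard_alt c
instance (c : String) (out : String) : Decidable (Spec_prefix_wout_wildcard c out) := by unfold Spec_prefix_wout_wildcard; infer_instance

-- ===== CLAIM (what is proved, stated in full; the proofs are below) =====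
def Claim_equal_prefix_wout_wildcard : Prop := ∀ (c : String), Dom_prefix_wout_wildcard c → Spec_prefix_wout_wildcard c (prefix_wout_wildcard c)

-- ===== LEMMAS AND PROOFS =====

-- proof-side reformulation of pass 1: Bool flag 'previous char was a backslash', offset removed
def pwwCutB (pb : Bool) : List Char → Nat
  | [] => 0
  | ch :: rest => if ch ∈ pyWildcards ∧ pb = false then 0 else pwwCutB (ch == '\\') rest + 1

theorem pwwCut_eq_cutB (l : List Char) : ∀ (prev : Option Char) (j : Nat),
    pwwCut prev j l = j + pwwCutB (prev == some '\\') l := by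
  induction l with
  | nil => intro prev j; simp [pwwCut, pwwCutB]
  | cons ch rest ih =>
    intro prev j
    by_cases h : ch ∈ pyWildcards ∧ prev ≠ some '\\'
    · have hb : (prev == some '\\') = false := by
        simp [beq_eq_false_iff_ne]; exact h.2
      simp [pwwCut, pwwCutB, h, hb]
    · rw [pwwCut, if_neg h, ih]
      rw [pwwCutB]
      have hs : (some ch == some '\\') = (ch == '\\') := by simp
      rw [hs]
      rcases Decidable.not_and_iff_not_or_not.mp h with h1 | h2
      · rw [if_neg (by simp [h1])]; omega
      · have : prev = some '\\' := by exact Decidable.not_not.mp h2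
        simp [this]; omega

theorem pwwCutB_true_eq_false {b : Char} (r : List Char) (hb : b ∉ pyWildcards) :
    pwwCutB true (b :: r) = pwwCutB false (b :: r) := by
  simp [pwwCutB, hb]

theorem pwwLoopA_eq (acc l : List Char) :
    pwwLoopA acc l = acc ++ pwwDrop (l.take (pwwCutB false l)) := by
  induction acc, l using pwwLoopA.induct with
  | case1 acc => simp [pwwLoopA, pwwCutB, pwwDrop]
  | case2 acc a b rest2 h ih =>
    -- escape pair: a = '\\' and b a wildcard
    obtain ⟨ha, hbw⟩ := h
    have hbne : b ≠ '\\' := by intro hb; rw [hb] at hbw; simp [pyWildcards] at hbw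
    have haw : a ∉ pyWildcards := by rw [ha]; simp [pyWildcards]
    have hcut : pwwCutB false (a :: b :: rest2) = pwwCutB false rest2 + 2 := by
      rw [pwwCutB, if_neg (by simp [haw])]
      rw [pwwCutB, if_neg (by simp [ha])]
      rw [show (b == '\\') = false from by simp [hbne]]
    have hdrop : pwwDrop (List.take (pwwCutB false rest2 + 2) (a :: b :: rest2))
        = b :: pwwDrop (List.take (pwwCutB false rest2) rest2) := by
      rw [show pwwCutB false rest2 + 2 = (pwwCutB false rest2 + 1) + 1 from rfl,
        List.take_succ_cons, List.take_succ_cons]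
      rw [pwwDrop, if_pos ⟨ha, by simp [pwwWildNext, hbw]⟩]
      rw [pwwDrop, if_neg (by simp [hbne])]
    rw [pwwLoopA, if_pos ⟨ha, hbw⟩, ih, hcut, hdrop]
    simp
  | case3 acc a b rest2 h haw =>
    -- first unescaped wildcard reached: return the accumulator
    have hcut : pwwCutB false (a :: b :: rest2) = 0 := by
      rw [pwwCutB, if_pos ⟨haw, rfl⟩]
    rw [pwwLoopA, if_neg h, if_pos haw, hcut]
    simp [pwwDrop]
  | case4 acc a b rest2 h haw ih =>
    -- ordinary character: keep it and continue
    have hcut : pwwCutB false (a :: b :: rest2) = pwwCutB false (b :: rest2) + 1 := by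
      rw [pwwCutB, if_neg (by simp [haw])]
      by_cases ha : a = '\\'
      · have hbw : b ∉ pyWildcards := fun hb => h ⟨ha, hb⟩
        rw [show (a == '\\') = true from by simp [ha],
          pwwCutB_true_eq_false rest2 hbw]
      · rw [show (a == '\\') = false from by simp [ha]]
    have hdrop : pwwDrop (List.take (pwwCutB false (b :: rest2) + 1) (a :: b :: rest2))
        = a :: pwwDrop (List.take (pwwCutB false (b :: rest2)) (b :: rest2)) := by
      rw [List.take_succ_cons]
      by_cases ha : a = '\\'
      · have hbw : b ∉ pyWildcards := fun hb => h ⟨ha, hb⟩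
        have hk : pwwCutB false (b :: rest2) = pwwCutB (b == '\\') rest2 + 1 := by
          rw [pwwCutB, if_neg (by simp [hbw])]
        rw [hk, List.take_succ_cons]
        rw [pwwDrop, if_neg (by simp [pwwWildNext, hbw])]
      · rw [pwwDrop, if_neg (by simp [ha])]
    rw [pwwLoopA, if_neg h, if_neg haw, ih, hcut, hdrop]
    simp
  | case5 acc a haw =>
    rw [pwwLoopA, if_pos haw, pwwCutB, if_pos ⟨haw, rfl⟩]
    simp [pwwDrop]
  | case6 acc a haw =>
    rw [pwwLoopA, if_neg haw, pwwCutB, if_neg (by simp [haw])]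
    simp [pwwCutB, pwwDrop, pwwWildNext]

-- ===== VERDICT (by name: the statement is the Claim_ definition above) =====
theorem prefix_wout_wildcard_spec : Claim_equal_prefix_wout_wildcard := by
  intro c _
  unfold Spec_prefix_wout_wildcard prefix_wout_wildcard prefix_wout_wildcard_alt
  rw [pwwCut_eq_cutB, pwwLoopA_eq]
  simp
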